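-- pv_equiv track=rewrite | github.com/MrBrantCode/unitest_baseline | mut_generate/mist_train_taco/taco_18787/solution.py | max_bin_tree_gcd
-- ===== SOURCE A (Python) =====
-- import math
--
-- def max_bin_tree_gcd(N, arr):
--     # Sort the array to group siblings together
--     arr.sort()
--     max_gcd = 0
--
--     # Iterate through the sorted array to find sibling pairs
--     i = 0
--     while i < len(arr) - 1:
--         if arr[i][0] == arr[i + 1][0]:
--             # Calculate GCD of sibling pairs
--             current_gcd = math.gcd(arr[i][1], arr[i + 1][1])
--             max_gcd = max(max_gcd, current_gcd)
--             # Skip the next element as it is already paired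
--             i += 2
--         else:
--             i += 1
--
--     return max_gcd
-- ===== SOURCE B (Python) =====
-- import math
--
-- def max_bin_tree_gcd(N, arr):
--     # Same in-place arr.sort() as the original (observable mutation preserved).
--     arr.sort()
--     # Group sibling values by parent with a dict, then pair consecutive
--     # values (0&1, 2&3, ...) inside each group; an unpaired trailing value
--     # is left out, exactly as pairing adjacent sorted entries does.
--     groups = {}
--     for p, v in arr:
--         groups.setdefault(p, []).append(v)
--     best = 0
--     for vals in groups.values():
--         for k in range(0, len(vals) - 1, 2):
--             best = max(best, math.gcd(vals[k], vals[k + 1]))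
--     return best
-- ===== Notes on version B (the rewrite author's own statement) =====
-- stated objective: alternative
-- what changed: Replaces A's single index-jumping scan (i+=2 on a sibling match, i+=1 otherwise) over the sorted array with a grouping decomposition: a dict collects each parent's value list in one pass, then each group's values are paired in steps of two; it trades the fused scan for explicit grouping of the same cost.
import Mathlib
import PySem

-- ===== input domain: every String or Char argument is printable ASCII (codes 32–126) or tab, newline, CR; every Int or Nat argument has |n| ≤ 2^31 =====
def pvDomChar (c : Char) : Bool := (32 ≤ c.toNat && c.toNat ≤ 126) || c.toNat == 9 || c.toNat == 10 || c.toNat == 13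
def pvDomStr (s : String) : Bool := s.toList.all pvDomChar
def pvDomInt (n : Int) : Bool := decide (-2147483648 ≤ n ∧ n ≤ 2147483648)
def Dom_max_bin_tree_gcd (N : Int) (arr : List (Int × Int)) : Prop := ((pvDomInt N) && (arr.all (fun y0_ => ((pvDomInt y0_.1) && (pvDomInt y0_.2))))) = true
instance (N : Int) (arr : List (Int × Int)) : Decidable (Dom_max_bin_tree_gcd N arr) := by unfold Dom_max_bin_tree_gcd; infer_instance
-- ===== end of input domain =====

-- B replaces A's index-jumping scan over the sorted array with dict grouping by
-- parent followed by step-2 pairing per group (objective: alternative; equal cost).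
-- Both Pythons sort arr in place; the equivalence proved here is about the return
-- value (the mutation of arr is the same arr.sort() in both).

-- ===== PORT A =====
-- the while loop: i advances by 2 on a sibling match, by 1 otherwise
def pvALoop (s : List (Int × Int)) (maxg : Int) (i : Nat) : Int :=
  if h : i + 1 < s.length then
    if (s[i]'(Nat.lt_of_succ_lt h)).1 == (s[i+1]'h).1 then
      pvALoop s (max maxg ((Int.gcd (s[i]'(Nat.lt_of_succ_lt h)).2 (s[i+1]'h).2 : Nat) : Int)) (i+2)
    else
      pvALoop s maxg (i+1)
  else maxg
termination_by s.length - i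
decreasing_by all_goals omega

def max_bin_tree_gcd (N : Int) (arr : List (Int × Int)) : Int :=
  pvALoop (PySem.List.sorted2 arr (fun p => p.1) (fun p => p.2)) 0 0

-- ===== PORT B =====
-- groups.setdefault(p, []).append(v) over the sorted array
def pvGroups (s : List (Int × Int)) : PySem.Dict Int (List Int) :=
  s.foldl (fun d p => d.modify p.1 [] (fun x => x ++ [p.2])) PySem.Dict.empty

-- for k in range(0, len(vals) - 1, 2): best = max(best, gcd(vals[k], vals[k+1]))
def pvPairLoop (vals : List Int) (best : Int) : Int :=
  (PySem.List.pyRange 0 ((vals.length : Int) - 1) 2).foldl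
    (fun b k => max b ((Int.gcd (PySem.List.pyGetD vals k 0) (PySem.List.pyGetD vals (k+1) 0) : Nat) : Int)) best

def max_bin_tree_gcd_alt (N : Int) (arr : List (Int × Int)) : Int :=
  ((pvGroups (PySem.List.sorted2 arr (fun p => p.1) (fun p => p.2))).values).foldl
    (fun best vals => pvPairLoop vals best) 0

-- ===== PRECONDITION & SPEC =====
def Spec_max_bin_tree_gcd (N : Int) (arr : List (Int × Int)) (out : Int) : Prop := out = max_bin_tree_gcd_alt N arr
instance (N : Int) (arr : List (Int × Int)) (out : Int) : Decidable (Spec_max_bin_tree_gcd N arr out) := by unfold Spec_max_bin_tree_gcd; infer_instance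

-- ===== CLAIM (what is proved, stated in full; the proofs are below) =====
def Claim_equal_max_bin_tree_gcd : Prop := ∀ (N : Int) (arr : List (Int × Int)), Dom_max_bin_tree_gcd N arr → Spec_max_bin_tree_gcd N arr (max_bin_tree_gcd N arr)

-- ===== LEMMAS AND PROOFS =====

-- A's scan of the sorted list, rephrased structurally (drop i)
def pairA : List (Int × Int) → Int → Int
  | x :: y :: t, best =>
    if x.1 == y.1 then pairA t (max best ((Int.gcd x.2 y.2 : Nat) : Int))
    else pairA (y :: t) best
  | _, best => best

-- pairing a group's values two at a time
def pairStep : List Int → Int → Int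
  | a :: b :: t, best => pairStep t (max best ((Int.gcd a b : Nat) : Int))
  | _, best => best

-- Python's lexicographic tuple order (≤ and its strict Bool form used by sorted2)
def pvLex (a b : Int × Int) : Prop := a.1 < b.1 ∨ (a.1 = b.1 ∧ a.2 ≤ b.2)

def pvBefore (a b : Int × Int) : Bool :=
  decide (a.1 < b.1) || (!decide (b.1 < a.1) && decide (a.2 < b.2))

lemma pvLex_trans {a b c : Int × Int} (h1 : pvLex a b) (h2 : pvLex b c) : pvLex a c := by
  unfold pvLex at *; omega

lemma lex_of_before {a b : Int × Int} (h : pvBefore a b = true) : pvLex a b := by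
  simp [pvBefore] at h; unfold pvLex; omega

lemma lex_of_not_before {a b : Int × Int} (h : pvBefore a b = false) : pvLex b a := by
  simp [pvBefore] at h; unfold pvLex; omega

lemma insertBy_pw (x : Int × Int) : ∀ (ys : List (Int × Int)), ys.Pairwise pvLex →
    (PySem.List.insertBy pvBefore x ys).Pairwise pvLex := by
  intro ys
  induction ys with
  | nil => intro _; simp [PySem.List.insertBy]
  | cons y t ih =>
    intro h
    rw [List.pairwise_cons] at h
    obtain ⟨hy, ht⟩ := h
    by_cases hb : pvBefore x y = true
    · rw [PySem.List.insertBy, if_pos hb]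
      constructor
      · intro z hz
        rcases List.mem_cons.mp hz with rfl | hz
        · exact lex_of_before hb
        · exact pvLex_trans (lex_of_before hb) (hy z hz)
      · exact List.pairwise_cons.mpr ⟨hy, ht⟩
    · rw [PySem.List.insertBy, if_neg hb]
      constructor
      · intro z hz
        rcases (PySem.List.mem_insertBy pvBefore x z t).mp hz with rfl | hz
        · exact lex_of_not_before (Bool.eq_false_iff.mpr hb)
        · exact hy z hz
      · exact ih ht

lemma foldl_insertBy_pw : ∀ (l acc : List (Int × Int)), acc.Pairwise pvLex →
    (l.foldl (fun acc x => PySem.List.insertBy pvBefore x acc) acc).Pairwise pvLex := by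
  intro l
  induction l with
  | nil => intro acc h; simpa using h
  | cons x t ih => intro acc h; exact ih _ (insertBy_pw x acc h)

lemma sorted2_pw (xs : List (Int × Int)) :
    (PySem.List.sorted2 xs (fun p => p.1) (fun p => p.2)).Pairwise pvLex := by
  have hdef : PySem.List.sorted2 xs (fun p => p.1) (fun p => p.2) =
      xs.foldl (fun acc x => PySem.List.insertBy pvBefore x acc) [] := rfl
  rw [hdef]
  exact foldl_insertBy_pw xs [] (by simp)

-- A's index loop is pairA of the dropped suffix
lemma aloop_eq : ∀ (n : Nat) (s : List (Int × Int)) (i : Nat) (best : Int),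
    s.length - i ≤ n → pvALoop s best i = pairA (s.drop i) best := by
  intro n
  induction n with
  | zero =>
    intro s i best hle
    have hlen : s.length ≤ i := by omega
    rw [pvALoop]
    rw [dif_neg (by omega)]
    rw [List.drop_eq_nil_of_le hlen]
    rfl
  | succ n ih =>
    intro s i best hle
    by_cases h : i + 1 < s.length
    · have hd : s.drop i = s[i]'(by omega) :: s[i+1]'h :: s.drop (i+2) := by
        rw [List.drop_eq_getElem_cons (by omega : i < s.length),
            List.drop_eq_getElem_cons (by omega : i + 1 < s.length)]
      rw [pvALoop, dif_pos h, hd]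
      by_cases he : (s[i]'(by omega)).1 == (s[i+1]'h).1
      · rw [if_pos he]
        show pvALoop s _ (i+2) = pairA (_ :: _ :: s.drop (i+2)) best
        rw [ih s (i+2) _ (by omega)]
        simp only [pairA, if_pos he]
      · rw [if_neg he]
        rw [ih s (i+1) best (by omega)]
        rw [List.drop_eq_getElem_cons (by omega : i + 1 < s.length)]
        simp only [pairA, if_neg he]
    · rw [pvALoop, dif_neg h]
      have hlen : (s.drop i).length ≤ 1 := by simp; omega
      rcases hd : s.drop i with _ | ⟨x, t⟩
      · rfl
      · have ht : t = [] := by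
          cases t with
          | nil => rfl
          | cons y u =>
            exfalso
            have h2 := congrArg List.length hd
            simp at h2
            omega
        subst ht
        rfl

-- the range(0, len-1, 2) loop, in Nat-range form
lemma pairstep_range : ∀ (n : Nat) (vals : List Int) (best : Int), vals.length ≤ n →
    (List.range (vals.length / 2)).foldl
      (fun b k => max b ((Int.gcd (vals.getD (2*k) 0) (vals.getD (2*k+1) 0) : Nat) : Int)) best
    = pairStep vals best := by
  intro n
  induction n with
  | zero =>
    intro vals best h
    have h0 : vals.length = 0 := by omega
    rw [List.length_eq_zero_iff.mp h0]
    rfl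
  | succ n ih =>
    intro vals best h
    match vals with
    | [] => rfl
    | [a] =>
      have h1 : ([a] : List Int).length / 2 = 0 := by norm_num
      rw [h1]
      rfl
    | a :: b :: t =>
      have hlen : (a :: b :: t : List Int).length / 2 = t.length / 2 + 1 := by
        simp; omega
      rw [hlen, List.range_succ_eq_map, List.foldl_cons, List.foldl_map]
      have hbody : (fun (x : Int) (y : Nat) =>
            max x ((Int.gcd ((a :: b :: t).getD (2 * Nat.succ y) 0) ((a :: b :: t).getD (2 * Nat.succ y + 1) 0) : Nat) : Int))
          = (fun (x : Int) (y : Nat) =>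
            max x ((Int.gcd (t.getD (2*y) 0) (t.getD (2*y+1) 0) : Nat) : Int)) := by
        funext x y
        have h2 : 2 * Nat.succ y + 1 = (2*y+1) + 1 + 1 := by omega
        have h1 : 2 * Nat.succ y = (2*y) + 1 + 1 := by omega
        rw [h2, h1, List.getD_cons_succ, List.getD_cons_succ, List.getD_cons_succ, List.getD_cons_succ]
      rw [hbody]
      have hht : t.length ≤ n := by simp at h; omega
      exact ih t (max best ((Int.gcd a b : Nat) : Int)) hht

lemma pairloop_eq (vals : List Int) (best : Int) : pvPairLoop vals best = pairStep vals best := by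
  unfold pvPairLoop
  rw [PySem.List.pyRange_of_pos 0 ((vals.length : Int) - 1) (by norm_num)]
  have hc : (if (0:Int) < (vals.length : Int) - 1 then (((vals.length : Int) - 1 - 0 + 2 - 1) / 2).toNat else 0)
      = vals.length / 2 := by
    split <;> omega
  rw [hc, List.foldl_map]
  have hbody : (fun (b : Int) (k : Nat) =>
        max b ((Int.gcd (PySem.List.pyGetD vals (0 + 2 * (k : Int)) 0) (PySem.List.pyGetD vals (0 + 2 * (k : Int) + 1) 0) : Nat) : Int))
      = (fun (b : Int) (k : Nat) =>
        max b ((Int.gcd (vals.getD (2*k) 0) (vals.getD (2*k+1) 0) : Nat) : Int)) := by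
    funext b k
    have h1 : (0 : Int) + 2 * (k : Int) = ((2*k : Nat) : Int) := by push_cast; ring
    have h2 : (0 : Int) + 2 * (k : Int) + 1 = ((2*k+1 : Nat) : Int) := by push_cast; ring
    rw [h2, h1, PySem.List.pyGetD_natCast, PySem.List.pyGetD_natCast]
  rw [hbody]
  exact pairstep_range vals.length vals best le_rfl

-- a run of equal keys followed by foreign keys: pairA consumes the run as pairStep
lemma pairA_run : ∀ (n : Nat) (g r : List (Int × Int)) (best : Int) (k0 : Int),
    g.length ≤ n → (∀ q ∈ g, q.1 = k0) → (∀ q ∈ r, q.1 ≠ k0) →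
    pairA (g ++ r) best = pairA r (pairStep (g.map (fun p => p.2)) best) := by
  intro n
  induction n with
  | zero =>
    intro g r best k0 hle _ _
    have h0 : g.length = 0 := by omega
    rw [List.length_eq_zero_iff.mp h0]
    rfl
  | succ n ih =>
    intro g r best k0 hle hg hr
    match g with
    | [] => rfl
    | [a] =>
      have ha : a.1 = k0 := hg a (by simp)
      match r with
      | [] => rfl
      | q :: rt =>
        have hq : q.1 ≠ k0 := hr q (by simp)
        have hne : (a.1 == q.1) = false := by
          simp only [beq_eq_false_iff_ne]; omega
        show pairA (a :: q :: rt) best = _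
        rw [pairA, if_neg (by simp [hne])]
        rfl
    | a :: b :: g' =>
      have ha : a.1 = k0 := hg a (by simp)
      have hb : b.1 = k0 := hg b (by simp)
      have heq : (a.1 == b.1) = true := by simp; omega
      show pairA (a :: b :: (g' ++ r)) best = _
      rw [pairA, if_pos (by simp [heq])]
      rw [ih g' r _ k0 (by simp at hle ⊢; omega) (fun q hq => hg q (by simp [hq])) hr]
      rfl

-- distinct keys of (run of k0) ++ rest, when k0 does not occur in rest
lemma ofList_run : ∀ (ks rk : List Int) (k0 : Int), ks ≠ [] → (∀ a ∈ ks, a = k0) → k0 ∉ rk →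
    PySem.Set.ofList (ks ++ rk) = k0 :: PySem.Set.ofList rk := by
  intro ks
  induction ks with
  | nil => intro rk k0 h; exact absurd rfl h
  | cons a ks' ih =>
    intro rk k0 _ hall hnm
    have ha : a = k0 := hall a (by simp)
    subst ha
    have hfix : PySem.Set.discard (PySem.Set.ofList rk) a = PySem.Set.ofList rk := by
      unfold PySem.Set.discard
      rw [List.filter_eq_self]
      intro y hy
      have hyrk : y ∈ rk := (PySem.Set.mem_ofList rk y).mp hy
      have hyne : y ≠ a := fun he => hnm (he ▸ hyrk)
      simp [hyne]
    by_cases hks : ks' = []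
    · subst hks
      rw [List.cons_append, List.nil_append, PySem.Set.ofList_cons, hfix]
    · rw [List.cons_append, PySem.Set.ofList_cons]
      rw [ih rk a hks (fun x hx => hall x (by simp [hx])) hnm]
      unfold PySem.Set.discard
      rw [List.filter_cons_of_neg (by simp)]
      unfold PySem.Set.discard at hfix
      rw [hfix]

-- MAIN: on a lexicographically ordered list, A's adjacent pairing equals
-- "for each distinct key, pair that key's values two at a time"
lemma dropWhile_keys_ne (x : Int × Int) (t : List (Int × Int))
    (hpw : (x :: t).Pairwise pvLex) :
    ∀ q ∈ List.dropWhile (fun pv : Int × Int => pv.1 == x.1) (x :: t), q.1 ≠ x.1 := by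
  intro q hq
  rcases hcr : List.dropWhile (fun pv : Int × Int => pv.1 == x.1) (x :: t) with _ | ⟨q0, rt⟩
  · rw [hcr] at hq; cases hq
  · rw [hcr] at hq
    have hq0 : (q0.1 == x.1) = false := by
      have hh := List.head?_dropWhile_not (fun pv : Int × Int => pv.1 == x.1) (x :: t)
      rw [hcr] at hh
      simpa using hh
    have hq0' : q0.1 ≠ x.1 := by simpa using hq0
    have hsub : (q0 :: rt).Sublist (x :: t) := by
      rw [← hcr]; exact List.dropWhile_sublist _
    have hq0m : q0 ∈ x :: t := hsub.subset (by simp)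
    have hx0 : x.1 < q0.1 := by
      rcases List.mem_cons.mp hq0m with rfl | hq0t
      · exact absurd rfl hq0'
      · have := (List.pairwise_cons.mp hpw).1 q0 hq0t
        unfold pvLex at this; omega
    have hprt : (q0 :: rt).Pairwise pvLex := hpw.sublist hsub
    rcases List.mem_cons.mp hq with rfl | hq
    · exact hq0'
    · have := (List.pairwise_cons.mp hprt).1 q hq
      unfold pvLex at this; omega

-- MAIN: on a lexicographically ordered list, A's adjacent pairing equals
-- "for each distinct key, pair that key's values two at a time"
lemma main_run : ∀ (n : Nat) (s : List (Int × Int)), s.length ≤ n → s.Pairwise pvLex →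
    ∀ best : Int, pairA s best =
      (PySem.Set.ofList (s.map (fun p => p.1))).foldl
        (fun b k => pairStep ((s.filter (fun p => p.1 == k)).map (fun p => p.2)) b) best := by
  intro n
  induction n with
  | zero =>
    intro s hle _ best
    have h0 : s.length = 0 := by omega
    rw [List.length_eq_zero_iff.mp h0]
    rfl
  | succ n ih =>
    intro s hle hpw best
    rcases s with _ | ⟨x, t⟩
    · rfl
    · obtain ⟨g, hgdef⟩ : ∃ g, List.takeWhile (fun pv : Int × Int => pv.1 == x.1) (x :: t) = g :=
        ⟨_, rfl⟩
      obtain ⟨r, hrdef⟩ : ∃ r, List.dropWhile (fun pv : Int × Int => pv.1 == x.1) (x :: t) = r :=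
        ⟨_, rfl⟩
      have hgr : g ++ r = x :: t := by
        rw [← hgdef, ← hrdef]; exact List.takeWhile_append_dropWhile
      have hxg : x ∈ g := by
        rw [← hgdef, List.takeWhile_cons_of_pos (by simp)]; simp
      have hgne : g ≠ [] := List.ne_nil_of_mem hxg
      have hgk : ∀ q ∈ g, q.1 = x.1 := by
        intro q hq
        rw [← hgdef] at hq
        have := List.mem_takeWhile_imp hq
        simpa using this
      have hpw' : (g ++ r).Pairwise pvLex := by rw [hgr]; exact hpw
      rw [List.pairwise_append] at hpw'
      obtain ⟨hpg, hpr, hcross⟩ := hpw'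
      have hrk : ∀ q ∈ r, q.1 ≠ x.1 := by
        intro q hq
        exact dropWhile_keys_ne x t hpw q (by rw [hrdef]; exact hq)
      have hrlen : r.length ≤ n := by
        have h1 : g.length + r.length = t.length + 1 := by
          have := congrArg List.length hgr
          simpa using this
        have h2 : 1 ≤ g.length := List.length_pos_of_ne_nil hgne
        have h3 : (x :: t).length ≤ n + 1 := hle
        simp at h3
        omega
      have hleft : pairA (x :: t) best = pairA r (pairStep (g.map (fun p => p.2)) best) := by
        rw [← hgr]
        exact pairA_run g.length g r best x.1 le_rfl hgk hrk
      have hkeys : PySem.Set.ofList ((x :: t).map (fun p => p.1))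
          = x.1 :: PySem.Set.ofList (r.map (fun p => p.1)) := by
        rw [← hgr, List.map_append]
        refine ofList_run (g.map (fun p => p.1)) (r.map (fun p => p.1)) x.1 ?_ ?_ ?_
        · simp [hgne]
        · intro a hha
          obtain ⟨q, hq, rfl⟩ := List.mem_map.mp hha
          exact hgk q hq
        · intro hm
          obtain ⟨q, hq, hqe⟩ := List.mem_map.mp hm
          exact hrk q hq hqe
      have hfx : (x :: t).filter (fun p => p.1 == x.1) = g := by
        rw [← hgr, List.filter_append]
        have h1 : g.filter (fun p => p.1 == x.1) = g :=
          List.filter_eq_self.mpr (fun q hq => by simp [hgk q hq])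
        have h2 : r.filter (fun p => p.1 == x.1) = [] := by
          rw [List.filter_eq_nil_iff]
          intro q hq
          simp [hrk q hq]
        rw [h1, h2, List.append_nil]
      have hcongr : ∀ (b : Int), ∀ k ∈ PySem.Set.ofList (r.map (fun p => p.1)),
          pairStep (((x :: t).filter (fun p => p.1 == k)).map (fun p => p.2)) b
          = pairStep ((r.filter (fun p => p.1 == k)).map (fun p => p.2)) b := by
        intro b k hk
        have hkr : k ∈ r.map (fun p => p.1) := (PySem.Set.mem_ofList _ _).mp hk
        obtain ⟨q, hq, rfl⟩ := List.mem_map.mp hkr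
        have hkne : ∀ w ∈ g, (w.1 == q.1) = false := by
          intro w hw
          have h1 := hgk w hw
          have h2 := hrk q hq
          simp
          omega
        have hflt : (x :: t).filter (fun p => p.1 == q.1) = r.filter (fun p => p.1 == q.1) := by
          rw [← hgr, List.filter_append,
              List.filter_eq_nil_iff.mpr (fun w hw => by simp [hkne w hw]), List.nil_append]
        rw [hflt]
      calc pairA (x :: t) best
          = pairA r (pairStep (g.map (fun p => p.2)) best) := hleft
        _ = (PySem.Set.ofList (r.map (fun p => p.1))).foldl
              (fun b k => pairStep ((r.filter (fun p => p.1 == k)).map (fun p => p.2)) b)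
              (pairStep (g.map (fun p => p.2)) best) := ih r hrlen hpr _
        _ = (PySem.Set.ofList (r.map (fun p => p.1))).foldl
              (fun b k => pairStep (((x :: t).filter (fun p => p.1 == k)).map (fun p => p.2)) b)
              (pairStep (g.map (fun p => p.2)) best) :=
            (PySem.List.foldl_congr_mem _ _ _ _ hcongr).symm
        _ = (PySem.Set.ofList ((x :: t).map (fun p => p.1))).foldl
              (fun b k => pairStep (((x :: t).filter (fun p => p.1 == k)).map (fun p => p.2)) b)
              best := by
            rw [hkeys]
            simp only [List.foldl_cons]
            rw [hfx]

-- assembling both ports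
lemma ports_eq (N : Int) (arr : List (Int × Int)) :
    max_bin_tree_gcd N arr = max_bin_tree_gcd_alt N arr := by
  unfold max_bin_tree_gcd max_bin_tree_gcd_alt
  set s := PySem.List.sorted2 arr (fun p => p.1) (fun p => p.2) with hs
  -- A side
  have hA : pvALoop s 0 0 = pairA s 0 := by
    have := aloop_eq s.length s 0 0 (by omega)
    simpa using this
  -- B side: dict structure
  have hnd : (pvGroups s).keys.Nodup := by
    have := PySem.Dict.nodup_keys_foldl_modify_key s (fun p => p.1) ([] : List Int)
      (fun _ p => (fun x => x ++ [p.2])) PySem.Dict.empty (by simp [PySem.Dict.keys_empty])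
    exact this
  have hkeys : (pvGroups s).keys = PySem.Set.ofList (s.map (fun p => p.1)) := by
    have := PySem.Dict.keys_foldl_modify_key s (fun p => p.1) ([] : List Int)
      (fun _ p => (fun x => x ++ [p.2])) PySem.Dict.empty
    rw [PySem.Dict.keys_empty, PySem.Set.update_nil_left] at this
    exact this
  have hget : ∀ k : Int, (pvGroups s).getD k [] = (s.filter (fun p => p.1 == k)).map (fun p => p.2) := by
    intro k
    have := PySem.Dict.getD_foldl_modify_append s PySem.Dict.empty k
    rw [PySem.Dict.getD_empty, List.nil_append] at this
    exact this
  have hvals : (pvGroups s).values = (pvGroups s).keys.map (fun k => (pvGroups s).getD k []) :=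
    PySem.Dict.values_eq_map_keys (pvGroups s) hnd []
  rw [hA, hvals, List.foldl_map, hkeys]
  have hbody : (fun (b : Int) (k : Int) => pvPairLoop ((pvGroups s).getD k []) b)
      = (fun (b : Int) (k : Int) => pairStep ((s.filter (fun p => p.1 == k)).map (fun p => p.2)) b) := by
    funext b k
    rw [hget k, pairloop_eq]
  rw [hbody]
  exact main_run s.length s le_rfl (sorted2_pw arr) 0

-- ===== VERDICT (by name: the statement is the Claim_ definition above) =====
theorem max_bin_tree_gcd_spec : Claim_equal_max_bin_tree_gcd := by
  intro N arr _
  unfold Spec_max_bin_tree_gcd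
  exact ports_eq N arr
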